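-- pv_equiv track=rewrite | github.com/nu-c3lab/mim-ir | mim_core/components/AnswerEngine/AnalyticsEngine/SortOperation.py | extract_sort_operation_type
-- ===== SOURCE A (Python) =====
-- def extract_sort_operation_type(
--                                 operation_str: str) -> str:
--     """
--     Extracts the sort operation type from the given string.
--     :param operation_str: String containing some sorting specification.
--     :return: A string representing the sorting operation to perform (either 'ascend' or 'descend').
--     """
--
--     # Initialize the default sorting operation
--     operation_type = 'ascend'
--
--     ######################################################################
--     # Use single keywords to determine sorting order
--     ######################################################################
--     # Initialize key words that indicate the sorting operation
--     primary_ascending_keys = ['ascend']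
--     primary_descending_keys = ['descend']
--
--     secondary_ascending_keys = ['alphabetic', 'chronological']
--
--     for word in primary_ascending_keys:
--         if word in operation_str:
--             return 'ascend'
--
--     for word in primary_descending_keys:
--         if word in operation_str:
--             return 'descend'
--
--     for word in secondary_ascending_keys:
--         if word in operation_str:
--             return 'ascend'
--
--     ######################################################################
--     # Use order pairs of words to determine the proper sorting order
--     ######################################################################
--     # Initialize pairs of ordering terms (should be listed as smaller to larger values)
--     ordering_pairs = [
--         ('low', 'high'),
--         ('least', 'greatest'),
--         ('first', 'last'),
--         ('young', 'old'),
--         ('small', 'large')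
--     ]
--
--     # Find index of each term in the second element and correlate them with the best ordering term pair
--     for pair in ordering_pairs:
--         first_idx = operation_str.find(pair[0])
--         second_idx = operation_str.find(pair[1])
--         if first_idx == -1 and second_idx == -1:
--             break
--         else:
--             if first_idx != -1 and second_idx == -1:
--                 return 'ascend'
--             elif first_idx == -1 and second_idx != -1:
--                 return 'descend'
--             elif first_idx < second_idx:
--                 return 'ascend'
--             elif second_idx < first_idx:
--                 return 'descend'
--
--     return operation_type
-- ===== SOURCE B (Python) =====
-- def extract_sort_operation_type(operation_str: str) -> str:
--     # One left-to-right scan over the string records the first occurrence index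
--     # of every relevant keyword at once; a pure decision table then reads them.
--     KEYS = ('ascend', 'descend', 'alphabetic', 'chronological', 'low', 'high')
--     firsts = [None] * 6
--     for i in range(len(operation_str)):
--         for j in range(6):
--             if firsts[j] is None and operation_str.startswith(KEYS[j], i):
--                 firsts[j] = i
--     asc, desc, alpha, chrono, low, high = firsts
--     if asc is not None:
--         return 'ascend'
--     if desc is not None:
--         return 'descend'
--     if alpha is not None or chrono is not None:
--         return 'ascend'
--     if high is None:
--         return 'ascend'
--     if low is None:
--         return 'descend'
--     return 'ascend' if low < high else 'descend'
-- ===== Notes on version B (the rewrite author's own statement) =====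
-- stated objective: alternative
-- what changed: Instead of A's staged membership tests and find() calls, B makes one left-to-right scan over the string that records the first occurrence index of all six relevant keywords at once, then decides from that table; the five-pair ordering loop (which always exits on its first iteration) disappears entirely.
import Mathlib
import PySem

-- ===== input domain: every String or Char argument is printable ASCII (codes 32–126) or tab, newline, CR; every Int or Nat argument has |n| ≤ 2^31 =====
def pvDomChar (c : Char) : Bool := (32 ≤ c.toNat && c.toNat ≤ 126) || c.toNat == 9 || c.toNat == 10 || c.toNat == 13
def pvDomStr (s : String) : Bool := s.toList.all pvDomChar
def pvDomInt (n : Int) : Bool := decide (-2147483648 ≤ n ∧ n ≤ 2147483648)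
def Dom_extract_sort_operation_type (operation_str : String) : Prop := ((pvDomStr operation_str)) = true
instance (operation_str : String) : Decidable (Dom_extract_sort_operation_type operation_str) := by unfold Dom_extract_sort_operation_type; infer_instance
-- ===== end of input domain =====

-- B replaces A's staged membership tests and find() calls by ONE left-to-right scan of the
-- string recording the first occurrence index of all six relevant keywords at once, followed
-- by a pure decision on that table; objective: alternative (a different algorithm, not claimed faster).

-- ===== PORT A =====
-- A's 'for word in keys: if word in s: return ret' loops
def pvALoop (keys : List String) (s ret : String) : Option String :=
  match keys with
  | [] => none
  | w :: rest => if PySem.Str.isIn w s then some ret else pvALoop rest s ret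

-- A's 'for pair in ordering_pairs' loop; none = loop broke or fell through
def pvAPairs (pairs : List (String × String)) (s : String) : Option String :=
  match pairs with
  | [] => none
  | p :: rest =>
    let first_idx := PySem.Str.find s p.1
    let second_idx := PySem.Str.find s p.2
    if first_idx = -1 ∧ second_idx = -1 then none   -- break
    else if first_idx ≠ -1 ∧ second_idx = -1 then some "ascend"
    else if first_idx = -1 ∧ second_idx ≠ -1 then some "descend"
    else if first_idx < second_idx then some "ascend"
    else if second_idx < first_idx then some "descend"
    else pvAPairs rest s

def extract_sort_operation_type (operation_str : String) : String :=
  let operation_type := "ascend"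
  match pvALoop ["ascend"] operation_str "ascend" with
  | some r => r
  | none =>
    match pvALoop ["descend"] operation_str "descend" with
    | some r => r
    | none =>
      match pvALoop ["alphabetic", "chronological"] operation_str "ascend" with
      | some r => r
      | none =>
        match pvAPairs [("low", "high"), ("least", "greatest"), ("first", "last"),
                        ("young", "old"), ("small", "large")] operation_str with
        | some r => r
        | none => operation_type

-- ===== PORT B =====
-- 'firsts[j] is None and operation_str.startswith(KEYS[j], i)' for one key
def pvUpd (s : List Char) (i : Nat) (k : List Char) (o : Option Nat) : Option Nat :=
  if o = none ∧ k.isPrefixOf (s.drop i) then some i else o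

-- the single pass 'for i in range(len(operation_str)): for j in range(6): …'
def pvScan (s : List Char) :
    Option Nat × Option Nat × Option Nat × Option Nat × Option Nat × Option Nat :=
  (List.range s.length).foldl
    (fun a i =>
      (pvUpd s i ['a','s','c','e','n','d'] a.1,
       pvUpd s i ['d','e','s','c','e','n','d'] a.2.1,
       pvUpd s i ['a','l','p','h','a','b','e','t','i','c'] a.2.2.1,
       pvUpd s i ['c','h','r','o','n','o','l','o','g','i','c','a','l'] a.2.2.2.1,
       pvUpd s i ['l','o','w'] a.2.2.2.2.1,
       pvUpd s i ['h','i','g','h'] a.2.2.2.2.2))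
    (none, none, none, none, none, none)

def extract_sort_operation_type_alt (operation_str : String) : String :=
  let f := pvScan operation_str.toList
  if f.1.isSome then "ascend"
  else if f.2.1.isSome then "descend"
  else if f.2.2.1.isSome ∨ f.2.2.2.1.isSome then "ascend"
  else
    match f.2.2.2.2.2, f.2.2.2.2.1 with
    | none, _ => "ascend"
    | some _, none => "descend"
    | some high, some low => if low < high then "ascend" else "descend"

-- ===== PRECONDITION & SPEC =====
def Spec_extract_sort_operation_type (operation_str : String) (out : String) : Prop := out = extract_sort_operation_type_alt operation_str
instance (operation_str : String) (out : String) : Decidable (Spec_extract_sort_operation_type operation_str out) := by unfold Spec_extract_sort_operation_type; infer_instance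

-- ===== CLAIM (what is proved, stated in full; the proofs are below) =====
def Claim_equal_extract_sort_operation_type : Prop := ∀ (operation_str : String), Dom_extract_sort_operation_type operation_str → Spec_extract_sort_operation_type operation_str (extract_sort_operation_type operation_str)

-- ===== LEMMAS AND PROOFS =====

-- one component of the scan, in isolation
def pvF1 (s k : List Char) : Option Nat :=
  (List.range s.length).foldl (fun a i => pvUpd s i k a) none

-- the six components of the joint fold do not interact
theorem pvScan_components (s : List Char) :
    pvScan s =
      (pvF1 s ['a','s','c','e','n','d'], pvF1 s ['d','e','s','c','e','n','d'],
       pvF1 s ['a','l','p','h','a','b','e','t','i','c'],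
       pvF1 s ['c','h','r','o','n','o','l','o','g','i','c','a','l'],
       pvF1 s ['l','o','w'], pvF1 s ['h','i','g','h']) := by
  unfold pvScan pvF1
  generalize List.range s.length = l
  suffices h : ∀ (l : List Nat)
      (a : Option Nat × Option Nat × Option Nat × Option Nat × Option Nat × Option Nat),
      l.foldl (fun a i =>
        (pvUpd s i ['a','s','c','e','n','d'] a.1,
         pvUpd s i ['d','e','s','c','e','n','d'] a.2.1,
         pvUpd s i ['a','l','p','h','a','b','e','t','i','c'] a.2.2.1,
         pvUpd s i ['c','h','r','o','n','o','l','o','g','i','c','a','l'] a.2.2.2.1,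
         pvUpd s i ['l','o','w'] a.2.2.2.2.1,
         pvUpd s i ['h','i','g','h'] a.2.2.2.2.2)) a =
      (l.foldl (fun a i => pvUpd s i ['a','s','c','e','n','d'] a) a.1,
       l.foldl (fun a i => pvUpd s i ['d','e','s','c','e','n','d'] a) a.2.1,
       l.foldl (fun a i => pvUpd s i ['a','l','p','h','a','b','e','t','i','c'] a) a.2.2.1,
       l.foldl (fun a i => pvUpd s i ['c','h','r','o','n','o','l','o','g','i','c','a','l'] a) a.2.2.2.1,
       l.foldl (fun a i => pvUpd s i ['l','o','w'] a) a.2.2.2.2.1,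
       l.foldl (fun a i => pvUpd s i ['h','i','g','h'] a) a.2.2.2.2.2) by
    exact h l (none, none, none, none, none, none)
  intro l
  induction l with
  | nil => intro a; rfl
  | cons i l ih =>
    intro a
    simp only [List.foldl_cons]
    exact ih _

-- a some accumulator is kept by the single-key fold
theorem pvFold_some (s k : List Char) (l : List Nat) (v : Nat) :
    l.foldl (fun a i => pvUpd s i k a) (some v) = some v := by
  induction l with
  | nil => rfl
  | cons i l ih => simpa [pvUpd] using ih

-- the single-key fold from none is find? over the scanned indices
theorem pvFold_none (s k : List Char) (l : List Nat) :
    l.foldl (fun a i => pvUpd s i k a) none = l.find? (fun i => k.isPrefixOf (s.drop i)) := by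
  induction l with
  | nil => rfl
  | cons i l ih =>
    simp only [List.foldl_cons, List.find?_cons]
    by_cases h : k.isPrefixOf (s.drop i) = true
    · rw [show pvUpd s i k none = some i from by simp [pvUpd, h]]
      simp [pvFold_some, h]
    · rw [show pvUpd s i k none = none from by simp [pvUpd, h]]
      simp [ih, h]

theorem pv_find?_range_eq_some {p : Nat → Bool} {n m : Nat} (hm : m < n) (hp : p m = true)
    (hmin : ∀ i < m, p i = false) : (List.range n).find? p = some m := by
  induction n with
  | zero => omega
  | succ n ih =>
    rw [List.range_succ, List.find?_append]
    rcases Nat.lt_or_ge m n with h | h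
    · rw [ih h]; rfl
    · have hmn : m = n := by omega
      have : (List.range n).find? p = none := by
        rw [List.find?_eq_none]
        intro i hi
        simp only [List.mem_range] at hi
        simp [hmin i (by omega)]
      rw [this]
      simp [← hmn, hp]

-- the scan component equals Python's str.find for a nonempty key
theorem pvF1_spec (s k : List Char) (hk : k ≠ []) :
    pvF1 s k = if PySem.Chars.find s k = -1 then none
               else some (PySem.Chars.find s k).toNat := by
  rw [pvF1, pvFold_none]
  split
  · next hfind =>
    rw [List.find?_eq_none]
    intro i _
    have hninf : ¬ k <:+: s := (PySem.Chars.find_eq_neg_one_iff s k).mp hfind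
    intro hp
    exact hninf (List.IsInfix.trans (List.isPrefixOf_iff_prefix.mp hp).isInfix
      (List.drop_suffix i s).isInfix)
  · next hfind =>
    have hnn : 0 ≤ PySem.Chars.find s k := by
      have := PySem.Chars.neg_one_le_find (s := s) (sub := k)
      omega
    obtain ⟨hpre, hmin⟩ := PySem.Chars.find_spec (s := s) (sub := k) hnn
    apply pv_find?_range_eq_some
    · -- index < length: the key is nonempty and is a prefix of the drop
      have hlen := hpre.length_le
      have hle := PySem.Chars.find_le_length (s := s) (sub := k)
      have hkpos : 0 < k.length := List.length_pos_iff.mpr hk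
      simp only [List.length_drop] at hlen
      omega
    · exact List.isPrefixOf_iff_prefix.mpr hpre
    · intro i hi
      exact Bool.eq_false_iff.mpr (fun hb => hmin i hi (List.isPrefixOf_iff_prefix.mp hb))

-- membership is exactly find ≠ -1
theorem pv_isIn_find (s k : List Char) :
    PySem.Chars.isIn k s = true ↔ PySem.Chars.find s k ≠ -1 := by
  rw [PySem.Chars.isIn_iff_infix, ← PySem.Chars.find_ne_neg_one_iff]

-- find can locate "low" and "high" at the same index only if both are absent
theorem pv_find_low_high_ne (l : List Char)
    (hl : PySem.Chars.find l ['l','o','w'] ≠ -1)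
    (hh : PySem.Chars.find l ['h','i','g','h'] ≠ -1) :
    PySem.Chars.find l ['l','o','w'] ≠ PySem.Chars.find l ['h','i','g','h'] := by
  intro heq
  have h1 := (PySem.Chars.findFrom_natCast_spec l ['l','o','w'] 0 (by simp)
    (by simpa using hl)).2.1
  have h2 := (PySem.Chars.findFrom_natCast_spec l ['h','i','g','h'] 0 (by simp)
    (by simpa using hh)).2.1
  simp only [Nat.cast_zero, PySem.Chars.findFrom_zero] at h1 h2
  rw [heq] at h1
  have := List.prefix_of_prefix_length_le h1 h2 (by simp)
  simp at this

-- ===== VERDICT (by name: the statement is the Claim_ definition above) =====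
theorem extract_sort_operation_type_spec : Claim_equal_extract_sort_operation_type := by
  intro s _
  unfold Spec_extract_sort_operation_type
  unfold extract_sort_operation_type extract_sort_operation_type_alt
  simp only [pvALoop, pvAPairs, pvScan_components,
    pvF1_spec s.toList ['a','s','c','e','n','d'] (by simp),
    pvF1_spec s.toList ['d','e','s','c','e','n','d'] (by simp),
    pvF1_spec s.toList ['a','l','p','h','a','b','e','t','i','c'] (by simp),
    pvF1_spec s.toList ['c','h','r','o','n','o','l','o','g','i','c','a','l'] (by simp),
    pvF1_spec s.toList ['l','o','w'] (by simp),
    pvF1_spec s.toList ['h','i','g','h'] (by simp)]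
  by_cases h1 : PySem.Chars.find s.toList ['a','s','c','e','n','d'] = -1
  case neg =>
    have i1 : PySem.Chars.isIn ['a','s','c','e','n','d'] s.toList = true :=
      (pv_isIn_find _ _).mpr h1
    simp [i1, h1]
  case pos =>
  have i1 : PySem.Chars.isIn ['a','s','c','e','n','d'] s.toList = false :=
    Bool.eq_false_iff.mpr (fun hb => absurd h1 (by simpa using (pv_isIn_find _ _).mp hb))
  by_cases h2 : PySem.Chars.find s.toList ['d','e','s','c','e','n','d'] = -1
  case neg =>
    have i2 : PySem.Chars.isIn ['d','e','s','c','e','n','d'] s.toList = true :=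
      (pv_isIn_find _ _).mpr h2
    simp [i1, i2, h1, h2]
  case pos =>
  have i2 : PySem.Chars.isIn ['d','e','s','c','e','n','d'] s.toList = false :=
    Bool.eq_false_iff.mpr (fun hb => absurd h2 (by simpa using (pv_isIn_find _ _).mp hb))
  by_cases h3 : PySem.Chars.find s.toList ['a','l','p','h','a','b','e','t','i','c'] = -1
  case neg =>
    have i3 : PySem.Chars.isIn ['a','l','p','h','a','b','e','t','i','c'] s.toList = true :=
      (pv_isIn_find _ _).mpr h3
    simp [i1, i2, i3, h1, h2, h3]
  case pos =>
  have i3 : PySem.Chars.isIn ['a','l','p','h','a','b','e','t','i','c'] s.toList = false :=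
    Bool.eq_false_iff.mpr (fun hb => absurd h3 (by simpa using (pv_isIn_find _ _).mp hb))
  by_cases h4 : PySem.Chars.find s.toList ['c','h','r','o','n','o','l','o','g','i','c','a','l'] = -1
  case neg =>
    have i4 : PySem.Chars.isIn ['c','h','r','o','n','o','l','o','g','i','c','a','l'] s.toList = true :=
      (pv_isIn_find _ _).mpr h4
    simp [i1, i2, i3, i4, h1, h2, h3, h4]
  case pos =>
  have i4 : PySem.Chars.isIn ['c','h','r','o','n','o','l','o','g','i','c','a','l'] s.toList = false :=
    Bool.eq_false_iff.mpr (fun hb => absurd h4 (by simpa using (pv_isIn_find _ _).mp hb))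
  by_cases hl : PySem.Chars.find s.toList ['l','o','w'] = -1
  · by_cases hh : PySem.Chars.find s.toList ['h','i','g','h'] = -1
    · simp [i1, i2, i3, i4, h1, h2, h3, h4, hl, hh]
    · simp [i1, i2, i3, i4, h1, h2, h3, h4, hl, hh]
  · by_cases hh : PySem.Chars.find s.toList ['h','i','g','h'] = -1
    · simp [i1, i2, i3, i4, h1, h2, h3, h4, hl, hh]
    · have hne := pv_find_low_high_ne s.toList hl hh
      have hlnn : 0 ≤ PySem.Chars.find s.toList ['l','o','w'] := by
        have := PySem.Chars.neg_one_le_find (s := s.toList) (sub := ['l','o','w'])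
        omega
      have hhnn : 0 ≤ PySem.Chars.find s.toList ['h','i','g','h'] := by
        have := PySem.Chars.neg_one_le_find (s := s.toList) (sub := ['h','i','g','h'])
        omega
      by_cases hlt : PySem.Chars.find s.toList ['l','o','w'] < PySem.Chars.find s.toList ['h','i','g','h']
      · have hnat : (PySem.Chars.find s.toList ['l','o','w']).toNat <
            (PySem.Chars.find s.toList ['h','i','g','h']).toNat := by omega
        simp [i1, i2, i3, i4, h1, h2, h3, h4, hl, hh, hlt, hnat]
      · have hgt : PySem.Chars.find s.toList ['h','i','g','h'] < PySem.Chars.find s.toList ['l','o','w'] := by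
          omega
        have hnat : ¬ (PySem.Chars.find s.toList ['l','o','w']).toNat <
            (PySem.Chars.find s.toList ['h','i','g','h']).toNat := by omega
        simp [i1, i2, i3, i4, h1, h2, h3, h4, hl, hh, hlt, hgt, hnat]
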